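-- pv_equiv track=rewrite | github.com/Nashid-Noor/Striver-s-CP-List-Solutions | Linear Search/4. Bear and Segment 01.py | solve
-- ===== SOURCE A (Python) =====
-- def solve(s):
--     c=0
--     Max=0
--     flag=False
--     for i in range(len(s)):
--         if s[i]=='1':
--             flag=True
--
--             if Max>c:
--                 return 'NO'
--             c+=1
--             Max=c
--         elif flag:
--             c-=1
--     if Max==0 and c==0:
--         return 'NO'
--     return 'YES'
-- ===== SOURCE B (Python) =====
-- def solve(s):
--     count = s.count('1')
--     if count == 0:
--         return 'NO'
--     first = s.find('1')
--     return 'YES' if s[first:first + count] == '1' * count else 'NO'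
-- ===== Notes on version B (the rewrite author's own statement) =====
-- stated objective: faster
-- what changed: Replaced A's per-character running-counter state machine with a count-then-verify check (count the '1's, find the first one, test the slice of that length is all '1's) built from str.count/find/slice, which run at C speed.
import Mathlib
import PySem

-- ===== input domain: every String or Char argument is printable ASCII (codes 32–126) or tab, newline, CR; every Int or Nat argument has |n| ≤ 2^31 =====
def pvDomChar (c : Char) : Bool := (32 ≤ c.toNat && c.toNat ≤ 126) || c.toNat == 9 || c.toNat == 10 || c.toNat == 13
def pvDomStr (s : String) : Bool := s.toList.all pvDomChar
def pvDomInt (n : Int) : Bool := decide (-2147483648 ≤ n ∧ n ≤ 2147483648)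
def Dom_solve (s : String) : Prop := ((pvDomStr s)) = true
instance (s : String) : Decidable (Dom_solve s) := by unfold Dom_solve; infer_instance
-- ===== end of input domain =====

-- B replaces A's running-counter state machine with a count-then-verify slice check via str built-ins (same O(n), measured constant-factor faster).

-- ===== PORT A =====
-- the for-loop of A as structural recursion over the characters, state (c, Max, flag); early 'return' = immediate result
def solveLoop : List Char → Int → Int → Bool → String
  | [], c, mx, _ => if mx == 0 && c == 0 then "NO" else "YES"
  | ch :: rest, c, mx, flag =>
    if ch == '1' then
      if mx > c then "NO"
      else solveLoop rest (c + 1) (c + 1) true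
    else if flag then solveLoop rest (c - 1) mx flag
    else solveLoop rest c mx flag

def solve (s : String) : String := solveLoop s.toList 0 0 false

-- ===== PORT B =====
def solve_alt (s : String) : String :=
  let count := PySem.Str.count s "1"
  if count == 0 then "NO"
  else
    let first := PySem.Str.find s "1"
    if PySem.Str.slice s (some first) (some (first + (count : Int)))
        == String.ofList (PySem.List.pyRepeat ['1'] (count : Int)) then "YES" else "NO"

-- ===== PRECONDITION & SPEC =====
def Spec_solve (s : String) (out : String) : Prop := out = solve_alt s
instance (s : String) (out : String) : Decidable (Spec_solve s out) := by unfold Spec_solve; infer_instance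

-- ===== CLAIM (what is proved, stated in full; the proofs are below) =====
def Claim_equal_solve : Prop := ∀ (s : String), Dom_solve s → Spec_solve s (solve s)

-- ===== LEMMAS AND PROOFS =====

-- Python s.count('1') is the character count
theorem chars_count_go_singleton (c : Char) (l : List Char) (fuel acc : Nat)
    (h : l.length ≤ fuel) :
    PySem.Chars.count.go [c] fuel l acc = acc + l.count c := by
  induction l generalizing fuel acc with
  | nil => cases fuel <;> simp [PySem.Chars.count.go]
  | cons hd tl ih =>
    cases fuel with
    | zero => simp at h
    | succ f =>
      have ht : tl.length ≤ f := by simp at h; omega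
      by_cases hc : hd = c
      · subst hc
        simp [PySem.Chars.count.go, List.isPrefixOf, ih f (acc + 1) ht]
        omega
      · simp [PySem.Chars.count.go, List.isPrefixOf, hc, ih f acc ht, Ne.symm hc]

theorem chars_count_singleton (l : List Char) (c : Char) :
    PySem.Chars.count l [c] = l.count c := by
  simp [PySem.Chars.count, chars_count_go_singleton c l l.length 0 le_rfl]

-- the first '1' in a ++ '1' :: t, with '1' ∉ a, is at index a.length
theorem find_one_decomp (a t : List Char) (ha : '1' ∉ a) :
    PySem.Chars.find (a ++ '1' :: t) ['1'] = (a.length : Int) := by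
  have hinf : ['1'] <:+: (a ++ '1' :: t) := ⟨a, t, by simp⟩
  have hnn : 0 ≤ PySem.Chars.find (a ++ '1' :: t) ['1'] :=
    (PySem.Chars.find_nonneg_iff _ _).2 hinf
  obtain ⟨hpre, hmin⟩ := PySem.Chars.find_spec (s := a ++ '1' :: t) (sub := ['1']) hnn
  set n := (PySem.Chars.find (a ++ '1' :: t) ['1']).toNat with hn
  have key : n = a.length := by
    rcases lt_trichotomy n a.length with h | h | h
    · exfalso
      rcases hpre with ⟨r, hr⟩
      have : (a ++ '1' :: t).drop n = a.drop n ++ '1' :: t := List.drop_append_of_le_length (le_of_lt h)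
      rw [this] at hr
      have ha' : a[n] = '1' := by
        have := congrArg (fun l => l.head?) hr
        simpa [List.head?_append, List.head?_drop, List.getElem?_eq_getElem h] using this.symm
      exact ha (ha' ▸ List.getElem_mem h)
    · exact h
    · exfalso
      exact hmin a.length h ⟨t, by simp⟩
  omega

-- contiguity: the first (count) entries of t are all '1'  ↔  no '1' after the leading run of '1's
theorem take_count_replicate_iff (t : List Char) :
    (t.take (t.count '1') = List.replicate (t.count '1') '1') ↔
      '1' ∉ t.dropWhile (· == '1') := by
  induction t with
  | nil => simp
  | cons hd tl ih =>
    by_cases h : hd = '1'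
    · subst h
      simpa [List.replicate_succ] using ih
    · have hc : (hd :: tl).count '1' = tl.count '1' := by simp [List.count_cons, h]
      rw [hc]
      have hd' : (hd :: tl).dropWhile (· == '1') = hd :: tl := by
        simp [h]
      rw [hd']
      rcases Nat.eq_zero_or_pos (tl.count '1') with h0 | h0
      · simp [h0, Ne.symm h, List.count_eq_zero.1 h0]
      · obtain ⟨k, hk⟩ : ∃ k, tl.count '1' = k + 1 := ⟨tl.count '1' - 1, by omega⟩
        refine iff_of_false ?_ (not_not_intro ?_)
        · intro he
          rw [hk, List.replicate_succ, List.take_succ_cons] at he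
          exact h (List.cons.injEq .. ▸ he).1
        · exact List.mem_cons.2 (Or.inr (List.count_pos_iff.1 h0))

-- ===== A-side loop characterisation =====

-- after the run has ended (c < mx): any further '1' is fatal
theorem solveLoop_phase2 (l : List Char) (c mx : Int) (h : c < mx) :
    solveLoop l c mx true = if '1' ∈ l then "NO" else "YES" := by
  induction l generalizing c with
  | nil => simp [solveLoop]; omega
  | cons hd tl ih =>
    by_cases h1 : hd = '1'
    · simp [solveLoop, h1, h]
    · simp [solveLoop, h1, Ne.symm h1, ih (c - 1) (by omega)]

-- inside the run (c = mx = m > 0)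
theorem solveLoop_phase1 (l : List Char) (m : Int) (h : 0 < m) :
    solveLoop l m m true = if '1' ∈ l.dropWhile (· == '1') then "NO" else "YES" := by
  induction l generalizing m with
  | nil => simp [solveLoop]; omega
  | cons hd tl ih =>
    by_cases h1 : hd = '1'
    · simpa [solveLoop, h1] using ih (m + 1) (by omega)
    · have : solveLoop (hd :: tl) m m true = solveLoop tl (m - 1) m true := by
        simp [solveLoop, h1]
      rw [this, solveLoop_phase2 tl (m - 1) m (by omega), List.dropWhile_cons]
      simp [h1, Ne.symm h1]

-- before any '1' (flag = false, c = mx = 0): skip characters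
theorem solveLoop_phase0 (a l : List Char) (ha : '1' ∉ a) :
    solveLoop (a ++ l) 0 0 false = solveLoop l 0 0 false := by
  induction a with
  | nil => rfl
  | cons hd tl ih =>
    have h1 : hd ≠ '1' := fun h => ha (h ▸ List.mem_cons_self)
    have step : solveLoop (hd :: (tl ++ l)) 0 0 false = solveLoop (tl ++ l) 0 0 false := by
      simp [solveLoop, h1]
    rw [List.cons_append, step]
    exact ih fun h => ha (List.mem_cons_of_mem _ h)

-- ===== VERDICT (by name: the statement is the Claim_ definition above) =====
theorem string_eq_iff_toList (x y : String) : (x = y) ↔ x.toList = y.toList :=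
  ⟨fun h => h ▸ rfl, fun h => by
    have := congrArg String.ofList h
    simpa using this⟩

theorem solve_spec : Claim_equal_solve := by
  intro s _
  unfold Spec_solve solve solve_alt
  have hcount : PySem.Str.count s "1" = s.toList.count '1' := by
    rw [PySem.Str.count_eq]
    exact chars_count_singleton s.toList '1'
  by_cases hmem : '1' ∈ s.toList
  · -- decompose: first '1' at index a.length
    have hsome : (PySem.List.index? s.toList '1').isSome := (PySem.List.index?_isSome_iff _ _).2 hmem
    obtain ⟨k, hk⟩ := Option.isSome_iff_exists.1 hsome
    obtain ⟨a, t, hl, _, ha⟩ := (PySem.List.index?_eq_some_iff _ _ _).1 hk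
    have hc : s.toList.count '1' = t.count '1' + 1 := by
      simp [hl, List.count_eq_zero.2 ha]
    have hfind : PySem.Str.find s "1" = (a.length : Int) := by
      rw [PySem.Str.find_eq]
      simpa [hl] using find_one_decomp a t ha
    -- the B-side slice condition
    have hslice : (PySem.Str.slice s (some (PySem.Str.find s "1"))
        (some (PySem.Str.find s "1" + (PySem.Str.count s "1" : Int)))).toList
        = (s.toList.drop a.length).take (s.toList.count '1') := by
      rw [hfind, hcount, PySem.Str.toList_slice, PySem.Chars.slice_eq_listSlice,
        PySem.List.slice_natCast_add]
    have hdrop : s.toList.drop a.length = '1' :: t := by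
      simp [hl]
    have hrep : (String.ofList (PySem.List.pyRepeat ['1'] ((PySem.Str.count s "1" : Nat) : Int))).toList
        = List.replicate (s.toList.count '1') '1' := by
      rw [PySem.List.pyRepeat_singleton]
      simp [hcount, chars_count_singleton]
    have hcond : (PySem.Str.slice s (some (PySem.Str.find s "1"))
          (some (PySem.Str.find s "1" + (PySem.Str.count s "1" : Int)))
        = String.ofList (PySem.List.pyRepeat ['1'] ((PySem.Str.count s "1" : Nat) : Int)))
        ↔ '1' ∉ t.dropWhile (· == '1') := by
      rw [string_eq_iff_toList, hslice, hrep, hdrop, hc, List.take_succ_cons,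
        List.replicate_succ, List.cons.injEq]
      simpa using take_count_replicate_iff t
    -- the A side
    have hA : solveLoop s.toList 0 0 false
        = if '1' ∈ t.dropWhile (· == '1') then "NO" else "YES" := by
      rw [hl, solveLoop_phase0 a _ ha]
      have step : solveLoop ('1' :: t) 0 0 false = solveLoop t 1 1 true := by
        simp [solveLoop]
      rw [step, solveLoop_phase1 t 1 (by omega)]
    rw [hA]
    have hne : ¬ (PySem.Str.count s "1" == 0) = true := by
      simp [hcount, chars_count_singleton, hc]
    simp only [hne, beq_iff_eq, hcond]
    by_cases hd : '1' ∈ t.dropWhile (· == '1') <;> simp [hd]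
  · -- no '1' anywhere: both sides are "NO"
    have h0 : s.toList.count '1' = 0 := List.count_eq_zero.2 hmem
    have hA : solveLoop s.toList 0 0 false = "NO" := by
      have := solveLoop_phase0 s.toList [] hmem
      simpa [solveLoop] using this
    simp [hA, chars_count_singleton, h0]
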